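-- pv_equiv track=rewrite | github.com/NicolasBizzozzero/AdventOfCode-2024 | src/problems/year2024/day12.py | region_perimeter
-- ===== SOURCE A (Python) =====
-- def region_perimeter(region: set[tuple[int, int]]) -> int:
--     """Given a set of (x,y) coordinates which forms a contiguous regions, returns the perimeter of this region.
--
--     :param region: The set of contiguous coordinates
--     :return: The perimeter of the region
--     """
--     # Define the relative positions of the four possible neighbors (top, bottom, left, right)
--     neighbors = [(0, 1), (0, -1), (1, 0), (-1, 0)]  # Top  # Bottom  # Right  # Left
--
--     perimeter = 0
--
--     for x, y in region:
--         # Check each neighbor to determine if it is part of the region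
--         for dx, dy in neighbors:
--             neighbor = (x + dx, y + dy)
--             if neighbor not in region:
--                 # If the neighbor is not in the region, this side contributes to the perimeter
--                 perimeter += 1
--
--     return perimeter
-- ===== SOURCE B (Python) =====
-- def region_perimeter(region: set[tuple[int, int]]) -> int:
--     """Perimeter = 4*cells - 2*shared_edges: count each internal adjacency once
--     by checking only the right and top neighbor of every cell."""
--     shared = 0
--     for x, y in region:
--         if (x + 1, y) in region:
--             shared += 1
--         if (x, y + 1) in region:
--             shared += 1
--     return 4 * len(region) - 2 * shared
-- ===== Notes on version B (the rewrite author's own statement) =====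
-- stated objective: alternative
-- what changed: B replaces A's four-direction exposed-side count per cell by the identity perimeter = 4*len(region) - 2*shared_edges, scanning only two directions (right and up) and counting each internal adjacency once.
import Mathlib
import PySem

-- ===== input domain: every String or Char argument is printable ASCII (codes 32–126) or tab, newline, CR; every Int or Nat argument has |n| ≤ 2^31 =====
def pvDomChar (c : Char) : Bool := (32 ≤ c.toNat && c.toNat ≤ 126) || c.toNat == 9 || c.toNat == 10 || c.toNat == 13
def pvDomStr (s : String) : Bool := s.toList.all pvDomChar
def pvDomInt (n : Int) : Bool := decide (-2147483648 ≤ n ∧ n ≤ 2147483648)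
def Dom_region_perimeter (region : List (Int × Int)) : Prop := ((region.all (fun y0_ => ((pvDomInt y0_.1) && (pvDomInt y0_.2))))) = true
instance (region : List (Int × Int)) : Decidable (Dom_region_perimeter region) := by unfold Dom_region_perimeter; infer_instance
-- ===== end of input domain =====

-- B computes perimeter as 4*cells - 2*shared_edges (checking only right/up neighbors) instead of
-- A's four-direction exposed-side count; same cost, different decomposition. (objective: alternative)

-- ===== PORT A =====
def region_perimeter (region : List (Int × Int)) : Int :=
  let neighbors : List (Int × Int) := [(0, 1), (0, -1), (1, 0), (-1, 0)]
  region.foldl (fun perimeter c =>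
    neighbors.foldl (fun perimeter d =>
      if (c.1 + d.1, c.2 + d.2) ∈ region then perimeter else perimeter + 1) perimeter) 0

-- ===== PORT B =====
def region_perimeter_alt (region : List (Int × Int)) : Int :=
  let shared : Int := region.foldl (fun shared c =>
    let shared := if (c.1 + 1, c.2) ∈ region then shared + 1 else shared
    if (c.1, c.2 + 1) ∈ region then shared + 1 else shared) 0
  4 * (region.length : Int) - 2 * shared

-- ===== PRECONDITION & SPEC =====
-- The Python parameter is a set; Pre_ only states the set representation invariant
-- (the list holds distinct elements) under the List-for-set type convention.
def Pre_region_perimeter (region : List (Int × Int)) : Prop := region.Nodup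
instance (region : List (Int × Int)) : Decidable (Pre_region_perimeter region) := by unfold Pre_region_perimeter; infer_instance
def pvWitness_region_perimeter : (List (Int × Int)) := [(0, 0), (1, 0), (1, 1)]
def Spec_region_perimeter (region : List (Int × Int)) (out : Int) : Prop := out = region_perimeter_alt region
instance (region : List (Int × Int)) (out : Int) : Decidable (Spec_region_perimeter region out) := by unfold Spec_region_perimeter; infer_instance

-- ===== CLAIM (what is proved, stated in full; the proofs are below) =====
def Claim_equal_region_perimeter : Prop := ∀ (region : List (Int × Int)), Dom_region_perimeter region → Pre_region_perimeter region → Spec_region_perimeter region (region_perimeter region)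

-- ===== LEMMAS AND PROOFS =====

-- sum of a pointwise sum splits
theorem pv_sum_map_add {α : Type} (L : List α) (f g : α → Int) :
    (L.map (fun c => f c + g c)).sum = (L.map f).sum + (L.map g).sum := by
  induction L with
  | nil => simp
  | cons a t ih => simp [ih]; ring

-- indicator sum = filter length
theorem pv_sum_ind_eq_filter {α : Type} (L : List α) (p : α → Prop) [DecidablePred p] :
    (L.map (fun c => if p c then (1 : Int) else 0)).sum
      = ((L.filter (fun c => decide (p c))).length : Int) := by
  induction L with
  | nil => simp
  | cons a t ih => by_cases h : p a <;> simp [h, ih] <;> ring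

-- counting core: on a duplicate-free list, shifting by t or by its inverse hits the
-- same number of cells (a bijection between the two sets of adjacent pairs)
theorem pv_shift_count (L : List (Int × Int)) (h : L.Nodup)
    (t tinv : Int × Int → Int × Int)
    (hlt : ∀ c, tinv (t c) = c) (hrt : ∀ c, t (tinv c) = c) :
    (L.map (fun c => if t c ∈ L then (1 : Int) else 0)).sum
      = (L.map (fun c => if tinv c ∈ L then (1 : Int) else 0)).sum := by
  rw [pv_sum_ind_eq_filter, pv_sum_ind_eq_filter]
  norm_cast
  rw [← List.toFinset_card_of_nodup (h.filter _), ← List.toFinset_card_of_nodup (h.filter _),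
      List.toFinset_filter, List.toFinset_filter]
  apply Finset.card_bij (fun c _ => t c)
  · intro c hc
    simp only [Finset.mem_filter, List.mem_toFinset, decide_eq_true_eq] at hc ⊢
    exact ⟨hc.2, by rw [hlt]; exact hc.1⟩
  · intro c₁ h₁ c₂ h₂ he
    have := congrArg tinv he
    rwa [hlt, hlt] at this
  · intro b hb
    simp only [Finset.mem_filter, List.mem_toFinset, decide_eq_true_eq] at hb
    refine ⟨tinv b, ?_, hrt b⟩
    simp only [Finset.mem_filter, List.mem_toFinset, decide_eq_true_eq]
    exact ⟨hb.2, by rw [hrt]; exact hb.1⟩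

-- sum of ones-where-absent = length minus sum of ones-where-present
theorem pv_sum_ite_flip {α : Type} (L : List α) (p : α → Prop) [DecidablePred p] :
    (L.map (fun c => if p c then (0 : Int) else 1)).sum
      = (L.length : Int) - (L.map (fun c => if p c then (1 : Int) else 0)).sum := by
  induction L with
  | nil => simp
  | cons a t ih => by_cases h : p a <;> simp [h, ih] <;> ring

theorem pv_sum_map_add4 {α : Type} (L : List α) (f1 f2 f3 f4 : α → Int) :
    (L.map (fun c => f1 c + (f2 c + (f3 c + f4 c)))).sum
      = (L.map f1).sum + ((L.map f2).sum + ((L.map f3).sum + (L.map f4).sum)) := by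
  induction L with
  | nil => simp
  | cons a t ih => simp [ih]; ring

theorem region_perimeter_spec : Claim_equal_region_perimeter := by
  intro L _ hpre
  unfold Spec_region_perimeter region_perimeter region_perimeter_alt
  have hA : (fun (p : Int) (c : Int × Int) =>
      List.foldl (fun p (d : Int × Int) =>
          if (c.1 + d.1, c.2 + d.2) ∈ L then p else p + 1) p
        [((0 : Int), (1 : Int)), (0, -1), (1, 0), (-1, 0)])
      = fun p c => p +
        ((if (c.1, c.2 + 1) ∈ L then (0 : Int) else 1)
        + ((if (c.1, c.2 + -1) ∈ L then (0 : Int) else 1)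
        + ((if (c.1 + 1, c.2) ∈ L then (0 : Int) else 1)
        + (if (c.1 + -1, c.2) ∈ L then (0 : Int) else 1)))) := by
    funext p c
    simp only [List.foldl_cons, List.foldl_nil, add_zero]
    split_ifs <;> ring
  have hB : (fun (s : Int) (c : Int × Int) =>
      let s' := if (c.1 + 1, c.2) ∈ L then s + 1 else s
      if (c.1, c.2 + 1) ∈ L then s' + 1 else s')
      = fun s c => s +
        ((if (c.1 + 1, c.2) ∈ L then (1 : Int) else 0)
        + (if (c.1, c.2 + 1) ∈ L then (1 : Int) else 0)) := by
    funext s c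
    simp only []
    split_ifs <;> ring
  simp only [hA, hB, PySem.List.foldl_add, pv_sum_map_add4, pv_sum_map_add, pv_sum_ite_flip]
  have e2 := pv_shift_count L hpre (fun c => (c.1, c.2 + -1)) (fun c => (c.1, c.2 + 1))
    (by intro c; simp) (by intro c; simp)
  have e4 := pv_shift_count L hpre (fun c => (c.1 + -1, c.2)) (fun c => (c.1 + 1, c.2))
    (by intro c; simp) (by intro c; simp)
  simp only at e2 e4
  rw [e2, e4]
  ring
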